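-- pv_equiv track=rewrite | github.com/oss-slu/cv_zebrafish | src/core/graphs/plots/spines.py | _apply_frame_budget
-- ===== SOURCE A (Python) =====
-- from typing import Dict, Iterable, List, Optional, Sequence, Tuple
--
-- def _apply_frame_budget(
--     frames_by_mode: Dict[str, List[int]],
--     budget: int,
--     priority: Sequence[str],
-- ) -> Tuple[List[int], bool]:
--     """Union frames using the provided priority order and enforce a budget."""
--     chosen: List[int] = []
--     seen = set()
--     total_unique = len(set().union(*frames_by_mode.values()))
--
--     for mode in priority:
--         for idx in sorted(frames_by_mode.get(mode, [])):
--             if idx in seen: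
--                 continue
--             seen.add(idx)
--             chosen.append(idx)
--             if budget and len(chosen) >= budget:
--                 return chosen, total_unique > budget
--     return chosen, total_unique > budget
-- ===== SOURCE B (Python) =====
-- def _apply_frame_budget(frames_by_mode, budget, priority):
--     """Union frames using the provided priority order and enforce a budget."""
--     flat = [idx for mode in priority for idx in sorted(frames_by_mode.get(mode, []))]
--     ordered = list(dict.fromkeys(flat))
--     if budget > 0:
--         chosen = ordered[:budget]
--     elif budget < 0:
--         chosen = []  # a negative budget admits no frames
--     else:
--         chosen = ordered  # budget 0 means no limit
--     total_unique = len(set().union(*frames_by_mode.values()))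
--     return chosen, total_unique > budget
-- ===== Notes on version B (the rewrite author's own statement) =====
-- stated objective: simpler
-- what changed: A streams through priority modes with a seen-set and an early return inside the inner loop; B builds the whole priority-ordered deduped union in one comprehension (dict.fromkeys) and then applies the budget by slicing afterwards.
-- intended difference: On a negative budget with at least one frame reachable through a priority mode, A returns exactly the first chosen frame (its early-return test 'len(chosen) >= budget' fires after the first append), while B returns an empty selection, the intended meaning of a budget that admits no frames; the overflow flag is identical. — e.g. on _apply_frame_budget([("a", [1, 2])], -1, ["a"]): A returns ([1], true), B returns ([], true)
import Mathlib
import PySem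

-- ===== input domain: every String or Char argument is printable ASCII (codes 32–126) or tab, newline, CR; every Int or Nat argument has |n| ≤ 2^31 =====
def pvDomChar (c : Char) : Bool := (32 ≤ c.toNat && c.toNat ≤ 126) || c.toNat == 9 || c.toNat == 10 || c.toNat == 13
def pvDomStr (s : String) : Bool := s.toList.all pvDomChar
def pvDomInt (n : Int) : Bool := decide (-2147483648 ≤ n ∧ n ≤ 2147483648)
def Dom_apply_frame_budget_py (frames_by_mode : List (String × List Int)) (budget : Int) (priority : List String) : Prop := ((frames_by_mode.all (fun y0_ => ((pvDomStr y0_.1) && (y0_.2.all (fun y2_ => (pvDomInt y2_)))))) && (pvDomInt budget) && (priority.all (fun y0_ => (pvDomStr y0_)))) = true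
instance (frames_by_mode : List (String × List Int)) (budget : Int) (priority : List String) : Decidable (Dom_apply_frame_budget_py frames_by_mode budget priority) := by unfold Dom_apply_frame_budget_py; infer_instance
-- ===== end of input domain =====

-- B replaces A's streaming pass (seen-set + early return inside the inner loop) by
-- build-the-whole-deduped-union-then-slice; on a negative budget B returns no frames where A
-- accidentally returns one (see D_ below). Not claimed faster.


-- ===== PORT A =====
-- inner 'for idx in sorted(...)' loop; Sum.inl = fall through with updated (chosen, seen),
-- Sum.inr = the early 'return chosen, total_unique > budget'
def aInner (budget tu : Int) : List Int → List Int → PySem.Set Int → ((List Int × PySem.Set Int) ⊕ (List Int × Bool))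
  | [], chosen, seen => Sum.inl (chosen, seen)
  | idx :: rest, chosen, seen =>
    if PySem.Set.contains seen idx then aInner budget tu rest chosen seen
    else
      let seen' := PySem.Set.add seen idx
      let chosen' := chosen ++ [idx]
      if budget ≠ 0 ∧ budget ≤ (chosen'.length : Int) then Sum.inr (chosen', decide (tu > budget))
      else aInner budget tu rest chosen' seen'

-- outer 'for mode in priority' loop
def aOuter (d : PySem.Dict String (List Int)) (budget tu : Int) : List String → List Int → PySem.Set Int → List Int × Bool
  | [], chosen, _seen => (chosen, decide (tu > budget))
  | mode :: rest, chosen, seen =>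
    match aInner budget tu (PySem.List.sorted (d.getD mode []) (fun x => x) false) chosen seen with
    | Sum.inl (c, s) => aOuter d budget tu rest c s
    | Sum.inr r => r

def apply_frame_budget_py (frames_by_mode : List (String × List Int)) (budget : Int) (priority : List String) : List Int × Bool :=
  let d := PySem.Dict.ofList frames_by_mode
  let total_unique : Int := ((PySem.Set.ofList (d.values.flatMap (fun l => l))).length : Int)
  aOuter d budget total_unique priority [] PySem.Set.empty

-- ===== PORT B =====
def apply_frame_budget_py_alt (frames_by_mode : List (String × List Int)) (budget : Int) (priority : List String) : List Int × Bool :=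
  let d := PySem.Dict.ofList frames_by_mode
  let flat := priority.flatMap (fun m => PySem.List.sorted (d.getD m []) (fun x => x) false)
  let ordered := PySem.List.dedup flat
  let chosen := if budget > 0 then ordered.take budget.toNat else if budget < 0 then [] else ordered
  let total_unique : Int := ((PySem.Set.ofList (d.values.flatMap (fun l => l))).length : Int)
  (chosen, decide (total_unique > budget))

-- ===== PRECONDITION & SPEC =====
-- On a negative budget with at least one frame reachable through a priority mode, A returns exactly
-- the first chosen frame (its 'len(chosen) >= budget' early-return fires after the first append),
-- while B returns an empty selection — the intended meaning of a budget that admits no frames;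
-- the overflow flag is identical.
def D_apply_frame_budget_py (frames_by_mode : List (String × List Int)) (budget : Int) (priority : List String) : Prop :=
  budget < 0 ∧ ∃ m ∈ priority, (PySem.Dict.ofList frames_by_mode).getD m [] ≠ []
instance (frames_by_mode : List (String × List Int)) (budget : Int) (priority : List String) : Decidable (D_apply_frame_budget_py frames_by_mode budget priority) := by unfold D_apply_frame_budget_py; infer_instance

def Spec_apply_frame_budget_py (frames_by_mode : List (String × List Int)) (budget : Int) (priority : List String) (out : List Int × Bool) : Prop := ¬ D_apply_frame_budget_py frames_by_mode budget priority → out = apply_frame_budget_py_alt frames_by_mode budget priority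
instance (frames_by_mode : List (String × List Int)) (budget : Int) (priority : List String) (out : List Int × Bool) : Decidable (Spec_apply_frame_budget_py frames_by_mode budget priority out) := by unfold Spec_apply_frame_budget_py; infer_instance

def pvDiffWitness_apply_frame_budget_py : (List (String × List Int)) × Int × List String := ([("a", [1, 2])], -1, ["a"])
def pvDiffWitnessOut_apply_frame_budget_py : (List Int × Bool) × (List Int × Bool) := (([1], true), ([], true))

-- ===== CLAIM (what is proved, stated in full; the proofs are below) =====
def Claim_unchanged_apply_frame_budget_py : Prop := ∀ (frames_by_mode : List (String × List Int)) (budget : Int) (priority : List String), Dom_apply_frame_budget_py frames_by_mode budget priority → Spec_apply_frame_budget_py frames_by_mode budget priority (apply_frame_budget_py frames_by_mode budget priority)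
def Claim_changed_apply_frame_budget_py : Prop := Dom_apply_frame_budget_py (pvDiffWitness_apply_frame_budget_py.1) (pvDiffWitness_apply_frame_budget_py.2.1) (pvDiffWitness_apply_frame_budget_py.2.2) ∧ D_apply_frame_budget_py (pvDiffWitness_apply_frame_budget_py.1) (pvDiffWitness_apply_frame_budget_py.2.1) (pvDiffWitness_apply_frame_budget_py.2.2) ∧ apply_frame_budget_py (pvDiffWitness_apply_frame_budget_py.1) (pvDiffWitness_apply_frame_budget_py.2.1) (pvDiffWitness_apply_frame_budget_py.2.2) = pvDiffWitnessOut_apply_frame_budget_py.1 ∧ apply_frame_budget_py_alt (pvDiffWitness_apply_frame_budget_py.1) (pvDiffWitness_apply_frame_budget_py.2.1) (pvDiffWitness_apply_frame_budget_py.2.2) = pvDiffWitnessOut_apply_frame_budget_py.2 ∧ pvDiffWitnessOut_apply_frame_budget_py.1 ≠ pvDiffWitnessOut_apply_frame_budget_py.2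
def Claim_exact_apply_frame_budget_py : Prop := ∀ (frames_by_mode : List (String × List Int)) (budget : Int) (priority : List String), Dom_apply_frame_budget_py frames_by_mode budget priority → D_apply_frame_budget_py frames_by_mode budget priority → apply_frame_budget_py frames_by_mode budget priority ≠ apply_frame_budget_py_alt frames_by_mode budget priority

-- ===== LEMMAS AND PROOFS =====

-- the new (not-yet-seen) elements of xs, first occurrences in order
def dAcc : List Int → PySem.Set Int → List Int
  | [], _ => []
  | x :: xs, s => if PySem.Set.contains s x then dAcc xs s else x :: dAcc xs (PySem.Set.add s x)

theorem dAcc_cons_mem {x : Int} {s : PySem.Set Int} (xs : List Int) (hc : x ∈ s) :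
    dAcc (x :: xs) s = dAcc xs s := by simp [dAcc, hc]

theorem dAcc_cons_not_mem {x : Int} {s : PySem.Set Int} (xs : List Int) (hc : x ∉ s) :
    dAcc (x :: xs) s = x :: dAcc xs (PySem.Set.add s x) := by simp [dAcc, hc]

theorem add_of_mem {x : Int} {s : PySem.Set Int} (hc : x ∈ s) : PySem.Set.add s x = s := by
  simp [PySem.Set.add, hc]

theorem add_of_not_mem {x : Int} {s : PySem.Set Int} (hc : x ∉ s) :
    PySem.Set.add s x = s ++ [x] := by simp [PySem.Set.add, hc]

theorem update_cons (s : PySem.Set Int) (x : Int) (xs : List Int) :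
    PySem.Set.update s (x :: xs) = PySem.Set.update (PySem.Set.add s x) xs := rfl

theorem update_eq_append_dAcc (xs : List Int) (s : PySem.Set Int) :
    PySem.Set.update s xs = s ++ dAcc xs s := by
  induction xs generalizing s with
  | nil => simp [PySem.Set.update, dAcc]
  | cons x xs ih =>
    rw [update_cons, ih]
    by_cases hc : x ∈ s
    · rw [add_of_mem hc, dAcc_cons_mem xs hc]
    · rw [dAcc_cons_not_mem xs hc, add_of_not_mem hc]
      simp

theorem dAcc_append (xs ys : List Int) (s : PySem.Set Int) :
    dAcc (xs ++ ys) s = dAcc xs s ++ dAcc ys (PySem.Set.update s xs) := by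
  induction xs generalizing s with
  | nil => simp [dAcc, PySem.Set.update]
  | cons x xs ih =>
    by_cases hc : x ∈ s
    · rw [List.cons_append, dAcc_cons_mem (xs ++ ys) hc, dAcc_cons_mem xs hc, ih,
          update_cons, add_of_mem hc]
    · rw [List.cons_append, dAcc_cons_not_mem (xs ++ ys) hc, dAcc_cons_not_mem xs hc, ih,
          update_cons]
      simp

theorem aInner_cons_mem (budget tu : Int) {x : Int} (xs chosen : List Int) {seen : PySem.Set Int}
    (hc : x ∈ seen) :
    aInner budget tu (x :: xs) chosen seen = aInner budget tu xs chosen seen := by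
  simp [aInner, hc]

theorem aInner_cons_not_mem (budget tu : Int) {x : Int} (xs chosen : List Int) {seen : PySem.Set Int}
    (hc : x ∉ seen) :
    aInner budget tu (x :: xs) chosen seen =
      if budget ≠ 0 ∧ budget ≤ (((chosen ++ [x]).length : Nat) : Int)
      then Sum.inr (chosen ++ [x], decide (tu > budget))
      else aInner budget tu xs (chosen ++ [x]) (PySem.Set.add seen x) := by
  simp [aInner, hc]

theorem aInner_spec (budget tu : Int) (hb : 0 ≤ budget) (xs chosen : List Int) (seen : PySem.Set Int)
    (h0 : 0 < budget → (chosen.length : Int) < budget) :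
    aInner budget tu xs chosen seen =
      if 0 < budget ∧ budget ≤ ((chosen.length + (dAcc xs seen).length : Nat) : Int)
      then Sum.inr ((chosen ++ dAcc xs seen).take budget.toNat, decide (tu > budget))
      else Sum.inl (chosen ++ dAcc xs seen, PySem.Set.update seen xs) := by
  induction xs generalizing chosen seen with
  | nil =>
    have hn : ¬ (0 < budget ∧ budget ≤ ((chosen.length + (dAcc ([] : List Int) seen).length : Nat) : Int)) := by
      rintro ⟨hpos, hle⟩
      have := h0 hpos
      simp [dAcc] at hle
      omega
    rw [if_neg hn]
    simp [aInner, dAcc, PySem.Set.update]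
  | cons x xs ih =>
    by_cases hc : x ∈ seen
    · rw [aInner_cons_mem budget tu xs chosen hc, ih chosen seen h0, dAcc_cons_mem xs hc,
          update_cons, add_of_mem hc]
    · rw [aInner_cons_not_mem budget tu xs chosen hc, dAcc_cons_not_mem xs hc, update_cons]
      by_cases hret : budget ≠ 0 ∧ budget ≤ (((chosen ++ [x]).length : Nat) : Int)
      · -- early return: chosen ++ [x] has length exactly budget
        have hpos : 0 < budget := by
          rcases hret with ⟨hne, _⟩; omega
        have hlt := h0 hpos
        have hle1 : budget ≤ ((chosen.length : Int) + 1) := by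
          have := hret.2
          simp only [List.length_append, List.length_cons, List.length_nil] at this
          push_cast at this
          omega
        rw [if_pos hret]
        have hcnd : 0 < budget ∧ budget ≤ ((chosen.length + (x :: dAcc xs (PySem.Set.add seen x)).length : Nat) : Int) := by
          refine ⟨hpos, ?_⟩
          push_cast
          simp only [List.length_cons]
          push_cast
          omega
        rw [if_pos hcnd]
        have hnat : budget.toNat = (chosen ++ [x]).length := by
          simp only [List.length_append, List.length_cons, List.length_nil]
          omega
        have hsplit : chosen ++ (x :: dAcc xs (PySem.Set.add seen x)) =
            (chosen ++ [x]) ++ dAcc xs (PySem.Set.add seen x) := by simp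
        rw [hsplit, hnat, List.take_left]
      · -- no early return: recurse
        rw [if_neg hret]
        have h0' : 0 < budget → (((chosen ++ [x]).length : Nat) : Int) < budget := by
          intro hpos
          have : ¬ budget ≤ (((chosen ++ [x]).length : Nat) : Int) := by
            intro h; exact hret ⟨by omega, h⟩
          omega
        rw [ih (chosen ++ [x]) (PySem.Set.add seen x) h0']
        have hnum : ((chosen ++ [x]).length + (dAcc xs (PySem.Set.add seen x)).length : Nat)
            = (chosen.length + (x :: dAcc xs (PySem.Set.add seen x)).length : Nat) := by
          simp only [List.length_append, List.length_cons, List.length_nil]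
          omega
        have hsplit : (chosen ++ [x]) ++ dAcc xs (PySem.Set.add seen x) =
            chosen ++ (x :: dAcc xs (PySem.Set.add seen x)) := by simp
        rw [hnum, hsplit]

-- the flattened, per-mode-sorted frame stream of the remaining priority list
def flatOf (d : PySem.Dict String (List Int)) (pr : List String) : List Int :=
  pr.flatMap (fun m => PySem.List.sorted (d.getD m []) (fun x => x) false)

theorem aOuter_spec (d : PySem.Dict String (List Int)) (budget tu : Int) (hb : 0 ≤ budget)
    (pr : List String) (chosen : List Int) (seen : PySem.Set Int)
    (h0 : 0 < budget → (chosen.length : Int) < budget) :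
    aOuter d budget tu pr chosen seen =
      ((if 0 < budget then (chosen ++ dAcc (flatOf d pr) seen).take budget.toNat
        else chosen ++ dAcc (flatOf d pr) seen), decide (tu > budget)) := by
  induction pr generalizing chosen seen with
  | nil =>
    by_cases hpos : 0 < budget
    · have hlen : (chosen ++ dAcc (flatOf d []) seen).length ≤ budget.toNat := by
        have := h0 hpos
        simp only [flatOf, List.flatMap_nil, dAcc, List.append_nil]
        omega
      rw [if_pos hpos, List.take_of_length_le hlen]
      simp [aOuter, flatOf, dAcc]
    · rw [if_neg hpos]
      simp [aOuter, flatOf, dAcc]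
  | cons m rest ih =>
    have hflat : flatOf d (m :: rest) =
        PySem.List.sorted (d.getD m []) (fun x => x) false ++ flatOf d rest := by
      simp [flatOf]
    set xs := PySem.List.sorted (d.getD m []) (fun x => x) false with hxs
    have hin := aInner_spec budget tu hb xs chosen seen h0
    by_cases hcnd : 0 < budget ∧ budget ≤ ((chosen.length + (dAcc xs seen).length : Nat) : Int)
    · rw [if_pos hcnd] at hin
      have hunf : aOuter d budget tu (m :: rest) chosen seen =
          ((chosen ++ dAcc xs seen).take budget.toNat, decide (tu > budget)) := by
        simp only [aOuter, ← hxs, hin]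
      rw [hunf, if_pos hcnd.1]
      have hpre : budget.toNat ≤ (chosen ++ dAcc xs seen).length := by
        have := hcnd.2
        simp only [List.length_append]
        omega
      rw [hflat, dAcc_append, ← List.append_assoc, List.take_append_of_le_length hpre]
    · rw [if_neg hcnd] at hin
      have hunf : aOuter d budget tu (m :: rest) chosen seen =
          aOuter d budget tu rest (chosen ++ dAcc xs seen) (PySem.Set.update seen xs) := by
        simp only [aOuter, ← hxs, hin]
      have h0' : 0 < budget → ((chosen ++ dAcc xs seen).length : Int) < budget := by
        intro hpos
        have hnle : ¬ budget ≤ ((chosen.length + (dAcc xs seen).length : Nat) : Int) :=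
          fun h => hcnd ⟨hpos, h⟩
        simp only [List.length_append]
        omega
      rw [hunf, ih (chosen ++ dAcc xs seen) (PySem.Set.update seen xs) h0',
          hflat, dAcc_append, ← List.append_assoc]

theorem aOuter_all_empty (d : PySem.Dict String (List Int)) (budget tu : Int)
    (pr : List String) (h : ∀ m ∈ pr, d.getD m [] = []) :
    aOuter d budget tu pr [] PySem.Set.empty = ([], decide (tu > budget)) := by
  induction pr with
  | nil => simp [aOuter]
  | cons m rest ih =>
    have hm : d.getD m [] = [] := h m (by simp)
    have hrest : ∀ m' ∈ rest, d.getD m' [] = [] := fun m' hm' => h m' (by simp [hm'])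
    simp only [aOuter, hm]
    have hs : PySem.List.sorted ([] : List Int) (fun x => x) false = [] := rfl
    rw [hs]
    simpa [aInner] using ih hrest

theorem aOuter_neg_nonempty (d : PySem.Dict String (List Int)) (budget tu : Int)
    (hneg : budget < 0) (pr : List String)
    (h : ∃ m ∈ pr, d.getD m [] ≠ []) :
    (aOuter d budget tu pr [] PySem.Set.empty).1 ≠ [] := by
  induction pr with
  | nil => simp at h
  | cons m rest ih =>
    by_cases hm : d.getD m [] = []
    · have hs : PySem.List.sorted (d.getD m []) (fun x => x) false = [] := by rw [hm]; rfl
      simp only [aOuter, hs, aInner]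
      apply ih
      obtain ⟨m', hm', hne⟩ := h
      rcases List.mem_cons.mp hm' with h1 | h1
      · exact absurd hm (h1 ▸ hne)
      · exact ⟨m', h1, hne⟩
    · have hs : PySem.List.sorted (d.getD m []) (fun x => x) false ≠ [] := by
        rw [Ne, PySem.List.sorted_eq_nil_iff]; exact hm
      obtain ⟨x, xs, hxs⟩ := List.exists_cons_of_ne_nil hs
      have hnm : x ∉ (PySem.Set.empty : PySem.Set Int) := by simp [PySem.Set.empty]
      have hguard : budget ≠ 0 ∧ budget ≤ (((([] : List Int) ++ [x]).length : Nat) : Int) := by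
        refine ⟨by omega, ?_⟩
        simp only [List.nil_append, List.length_cons, List.length_nil]
        omega
      simp only [aOuter, hxs]
      rw [aInner_cons_not_mem budget tu xs [] hnm, if_pos hguard]
      simp

theorem ofList_eq_dAcc (xs : List Int) : PySem.Set.ofList xs = dAcc xs [] := by
  have h := update_eq_append_dAcc xs []
  rw [show PySem.Set.update ([] : PySem.Set Int) xs = PySem.Set.ofList xs from rfl] at h
  simpa using h

-- ===== VERDICT (by name: the statement is the Claim_ definition above) =====
theorem apply_frame_budget_py_spec : Claim_unchanged_apply_frame_budget_py := by
  intro fbm budget priority _hdom hnd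
  show apply_frame_budget_py fbm budget priority = apply_frame_budget_py_alt fbm budget priority
  simp only [apply_frame_budget_py, apply_frame_budget_py_alt]
  set d := PySem.Dict.ofList fbm with hd
  rcases lt_trichotomy budget 0 with hneg | hzero | hpos
  · -- budget < 0: ¬D_ forces every priority lookup to be empty
    have hall : ∀ m ∈ priority, d.getD m [] = [] := by
      intro m hm
      by_contra hne
      exact hnd ⟨hneg, m, hm, hne⟩
    rw [aOuter_all_empty d budget _ priority hall]
    simp [show ¬ (0:Int) < budget by omega, hneg]
  · subst hzero
    rw [aOuter_spec d 0 _ le_rfl priority [] PySem.Set.empty (by simp)]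
    simp [flatOf]
    exact (ofList_eq_dAcc _).symm
  · rw [aOuter_spec d budget _ (le_of_lt hpos) priority [] PySem.Set.empty
        (fun _ => by simpa using hpos)]
    simp [hpos, flatOf]
    rw [ofList_eq_dAcc]

theorem apply_frame_budget_py_changed : Claim_changed_apply_frame_budget_py := by
  unfold Claim_changed_apply_frame_budget_py; decide

theorem apply_frame_budget_py_tight : Claim_exact_apply_frame_budget_py := by
  intro fbm budget priority _hdom hD
  obtain ⟨hneg, hex⟩ := hD
  intro heq
  have hA := aOuter_neg_nonempty (PySem.Dict.ofList fbm) budget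
    ((PySem.Set.ofList ((PySem.Dict.ofList fbm).values.flatMap (fun l => l))).length : Int)
    hneg priority hex
  have hB : (apply_frame_budget_py_alt fbm budget priority).1 = [] := by
    simp only [apply_frame_budget_py_alt]
    simp [show ¬ (0:Int) < budget by omega, hneg]
  apply hA
  show (apply_frame_budget_py fbm budget priority).1 = []
  rw [heq]
  exact hB
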